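-- pv_equiv track=rewrite | github.com/blxz96/Advent-Of-Code | 2024/Day9/DiskFragmenter.py | move_file
-- ===== SOURCE A (Python) =====
-- def move_file(block_representation: list, file_id_first_index: int, file_id_block_size: int) -> list:
--     empty_space_first_index = -1
--     empty_space_length = 0
--     is_contiguous = False
--     # iterate only up to before file_id_first_index
--     for i in range(file_id_first_index):
--         if block_representation[i] == '.':
--             if not is_contiguous:
--                 empty_space_first_index = i
--                 empty_space_length = 1
--                 is_contiguous = True
--             else:
--                 empty_space_length += 1
--         else:
--             is_contiguous = False
--             empty_space_first_index = -1
--             empty_space_length = 0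
--         if empty_space_length >= file_id_block_size:
--             for i in range(file_id_block_size):
--                 block_representation[empty_space_first_index + i], block_representation[file_id_first_index + i] \
--                     = block_representation[file_id_first_index + i], block_representation[
--                     empty_space_first_index + i]
--             break
--     return block_representation
-- ===== SOURCE B (Python) =====
-- def move_file(block_representation: list, file_id_first_index: int, file_id_block_size: int) -> list:
--     # Sliding-window search: first position where file_id_block_size consecutive '.' start.
--     for start in range(file_id_first_index - file_id_block_size + 1):
--         if all(block_representation[start + k] == '.' for k in range(file_id_block_size)):
--             for k in range(file_id_block_size):
--                 block_representation[start + k], block_representation[file_id_first_index + k] \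
--                     = block_representation[file_id_first_index + k], block_representation[start + k]
--             break
--     return block_representation
-- ===== Notes on version B (the rewrite author's own statement) =====
-- stated objective: simpler
-- what changed: Replaced A's stateful run-length scan (contiguity flag, run start, run length, break on reaching the size) by a sliding-window search for the first position where file_id_block_size consecutive '.' cells start, then the same in-place swap; the Pre_ excludes exactly the inputs on which A raises IndexError (scan or swap index out of range).
import Mathlib
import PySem

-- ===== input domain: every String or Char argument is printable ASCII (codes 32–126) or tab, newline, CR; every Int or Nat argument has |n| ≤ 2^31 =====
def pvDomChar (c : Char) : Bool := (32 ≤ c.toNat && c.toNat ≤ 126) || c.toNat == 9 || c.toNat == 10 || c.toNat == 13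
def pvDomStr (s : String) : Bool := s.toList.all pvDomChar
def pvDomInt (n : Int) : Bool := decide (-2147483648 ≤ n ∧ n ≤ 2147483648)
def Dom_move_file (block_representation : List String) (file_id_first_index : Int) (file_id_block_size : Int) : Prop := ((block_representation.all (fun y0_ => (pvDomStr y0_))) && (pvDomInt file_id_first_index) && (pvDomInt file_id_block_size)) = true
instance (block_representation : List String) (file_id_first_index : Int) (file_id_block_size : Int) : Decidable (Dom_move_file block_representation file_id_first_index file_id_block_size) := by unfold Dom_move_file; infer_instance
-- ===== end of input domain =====

-- B replaces A's stateful run-length scan by a sliding-window search for the first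
-- position where `size` consecutive '.' start (objective: simpler). Both Pythons mutate
-- the list in place in the same way; the equivalence proved is about the return value.

-- ===== PORT A =====

/-- Inner swap loop `for k in range(size): block[a+k], block[b+k] = block[b+k], block[a+k]`
(textually identical in A and B; Python raises IndexError where a read is `none`). -/
def pvSwapGo (a b : Int) : List Int → List String → List String
  | [], block => block
  | k :: rest, block =>
    match PySem.List.pyGet? block (b + k), PySem.List.pyGet? block (a + k) with
    | some x, some y =>
        pvSwapGo a b rest (PySem.List.pySetD (PySem.List.pySetD block (a + k) x) (b + k) y)
    | _, _ => block   -- IndexError in Python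

/-- A's scan over i = 0,1,…,fi-1 (fuel = number of remaining loop iterations):
state (empty_space_first_index, empty_space_length, is_contiguous). -/
def pvScanA (fi size : Int) : Nat → Int → Int → Int → Bool → List String → List String
  | 0, _, _, _, _, block => block
  | fuel + 1, i, esfi, esl, contig, block =>
    if i < fi then
      match PySem.List.pyGet? block i with
      | none => block   -- IndexError in Python
      | some c =>
        let esfi' := if c == "." then (if !contig then i else esfi) else -1
        let esl'  := if c == "." then (if !contig then 1 else esl + 1) else 0
        let contig' := c == "."
        if size ≤ esl' then pvSwapGo esfi' fi (PySem.List.pyRange 0 size 1) block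
        else pvScanA fi size fuel (i + 1) esfi' esl' contig' block
    else block

def move_file (block_representation : List String) (file_id_first_index : Int) (file_id_block_size : Int) : List String :=
  pvScanA file_id_first_index file_id_block_size file_id_first_index.toNat 0 (-1) 0 false block_representation

-- ===== PORT B =====

/-- `all(block[start+k] == '.' for k in range(size))` -/
def pvAllDots (block : List String) (s size : Int) : Bool :=
  (PySem.List.pyRange 0 size 1).all (fun k => PySem.List.pyGet? block (s + k) == some ".")

/-- B's loop over candidate window starts s = 0,1,…,fi-size (fuel = remaining iterations). -/
def pvScanB (fi size : Int) : Nat → Int → List String → List String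
  | 0, _, block => block
  | fuel + 1, s, block =>
    if s < fi - size + 1 then
      if pvAllDots block s size then pvSwapGo s fi (PySem.List.pyRange 0 size 1) block
      else pvScanB fi size fuel (s + 1) block
    else block

def move_file_alt (block_representation : List String) (file_id_first_index : Int) (file_id_block_size : Int) : List String :=
  pvScanB file_id_first_index file_id_block_size
    (file_id_first_index - file_id_block_size + 1).toNat 0 block_representation

-- ===== PRECONDITION & SPEC =====

/-- Is there a run of `size` dots starting at some s with s + size ≤ fi (all reads in range)? -/
def pvHasGap (block : List String) (fi size : Int) : Bool :=
  (List.range block.length).any (fun s =>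
    if (s : Int) + size ≤ fi ∧ (s : Int) + size ≤ (block.length : Int) then
      (List.range size.toNat).all (fun k => PySem.List.pyGet? block ((s : Int) + (k : Int)) == some ".")
    else false)

-- Pre_ is exactly the set of inputs on which the Python A returns (no IndexError):
-- A raises when the scan reads past the end of the list, or when a fitting gap exists but
-- the swap's source indices file_id_first_index..+size-1 run past the end, or when
-- file_id_block_size ≤ 0 < file_id_first_index on the empty list (block[0] is read).
def Pre_move_file (block_representation : List String) (file_id_first_index : Int) (file_id_block_size : Int) : Prop :=
  file_id_first_index ≤ 0
  ∨ (file_id_block_size ≤ 0 ∧ block_representation ≠ [])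
  ∨ (0 < file_id_block_size ∧
      (if pvHasGap block_representation file_id_first_index file_id_block_size
       then file_id_first_index + file_id_block_size ≤ (block_representation.length : Int)
       else file_id_first_index ≤ (block_representation.length : Int)))

instance (block_representation : List String) (file_id_first_index : Int) (file_id_block_size : Int) : Decidable (Pre_move_file block_representation file_id_first_index file_id_block_size) := by unfold Pre_move_file; infer_instance

def pvWitness_move_file : List String × Int × Int := ([".", ".", "7", "8"], 2, 2)

def Spec_move_file (block_representation : List String) (file_id_first_index : Int) (file_id_block_size : Int) (out : List String) : Prop := out = move_file_alt block_representation file_id_first_index file_id_block_size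
instance (block_representation : List String) (file_id_first_index : Int) (file_id_block_size : Int) (out : List String) : Decidable (Spec_move_file block_representation file_id_first_index file_id_block_size out) := by unfold Spec_move_file; infer_instance

-- ===== CLAIM (what is proved, stated in full; the proofs are below) =====
def Claim_equal_move_file : Prop := ∀ (block_representation : List String) (file_id_first_index : Int) (file_id_block_size : Int), Dom_move_file block_representation file_id_first_index file_id_block_size → Pre_move_file block_representation file_id_first_index file_id_block_size → Spec_move_file block_representation file_id_first_index file_id_block_size (move_file block_representation file_id_first_index file_id_block_size)

-- ===== LEMMAS AND PROOFS =====

lemma pvAllDots_iff (block : List String) (s size : Int) :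
    pvAllDots block s size = true ↔
      ∀ k : Int, 0 ≤ k → k < size → PySem.List.pyGet? block (s + k) = some "." := by
  simp [pvAllDots, List.all_eq_true, PySem.List.mem_pyRange_one]

lemma pvScanB_nonpos (fi size : Int) (h : size ≤ 0) (fuel : Nat) (s : Int) (block : List String) :
    pvScanB fi size fuel s block = block := by
  cases fuel with
  | zero => rfl
  | succ fuel =>
    have hall : pvAllDots block s size = true := by
      simp [pvAllDots, PySem.List.pyRange_one_eq_nil (by omega : size ≤ 0)]
    simp only [pvScanB, hall, if_true]
    rw [PySem.List.pyRange_one_eq_nil (by omega : size ≤ 0)]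
    split <;> rfl

lemma pvScanB_skip (fi size : Int) (block : List String) :
    ∀ (n : Nat) (s0 s1 : Int), s0 ≤ s1 → s1 - s0 = n →
      (∀ s, s0 ≤ s → s < s1 → pvAllDots block s size = false) →
      pvScanB fi size (fi - size + 1 - s0).toNat s0 block
        = pvScanB fi size (fi - size + 1 - s1).toNat s1 block := by
  intro n
  induction n with
  | zero =>
    intro s0 s1 h1 h2 _
    have h : s0 = s1 := by omega
    rw [h]
  | succ n ih =>
    intro s0 s1 h1 h2 hrej
    have hlt : s0 < s1 := by omega
    by_cases hb : s0 < fi - size + 1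
    · rw [show (fi - size + 1 - s0).toNat = (fi - size + 1 - (s0 + 1)).toNat + 1 by omega]
      simp only [pvScanB, if_pos hb, hrej s0 le_rfl hlt, Bool.false_eq_true, if_false]
      exact ih (s0 + 1) s1 (by omega) (by omega) (fun s hs1 hs2 => hrej s (by omega) hs2)
    · rw [show (fi - size + 1 - s0).toNat = 0 by omega,
          show (fi - size + 1 - s1).toNat = 0 by omega]
      rfl

lemma pvScan_main (fi size : Int) (block : List String)
    (hsize : 0 < size) (hfi : fi ≤ (block.length : Int)) :
    ∀ (m i esl : Nat),
      (i : Int) + m = fi →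
      esl ≤ i → (esl : Int) < size →
      (∀ j : Nat, i - esl ≤ j → j < i → PySem.List.pyGet? block (j : Int) = some ".") →
      pvScanA fi size m (i : Int)
          (if 0 < esl then (i : Int) - (esl : Int) else -1) (esl : Int) (decide (0 < esl)) block
        = pvScanB fi size (fi - size + 1 - ((i : Int) - (esl : Int))).toNat ((i : Int) - (esl : Int)) block := by
  intro m
  induction m with
  | zero =>
    intro i esl hm hle hlt _
    rw [show (fi - size + 1 - ((i : Int) - (esl : Int))).toNat = 0 by omega]
    rfl
  | succ m ih =>
    intro i esl hm hle hlt hdots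
    have hi_lt : (i : Int) < fi := by omega
    have hi_len : i < block.length := by omega
    have hget : PySem.List.pyGet? block (i : Int) = some block[i] := by
      simp [List.getElem?_eq_getElem hi_len]
    simp only [pvScanA, if_pos hi_lt, hget]
    by_cases hc : block[i] = "."
    · -- dot at i
      by_cases htr : size ≤ (esl : Int) + 1
      · -- trigger: size = esl + 1
        have haccept : pvAllDots block ((i : Int) - (esl : Int)) size = true := by
          rw [pvAllDots_iff]
          intro k hk0 hk1
          by_cases hk : k = (esl : Int)
          · subst hk; simpa [hc, show (i:Int) - esl + esl = (i:Int) by ring] using hget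
          · have hj : ((i - esl + k.toNat : Nat) : Int) = (i : Int) - esl + k := by omega
            rw [← hj]
            exact hdots _ (by omega) (by omega)
        rw [show (fi - size + 1 - ((i : Int) - (esl : Int))).toNat
              = (fi - size + 1 - ((i : Int) - (esl : Int) + 1)).toNat + 1 by omega]
        simp only [pvScanB, if_pos (by omega : (i : Int) - (esl : Int) < fi - size + 1),
                   haccept, if_true]
        simp only [hc, BEq.rfl, if_true]
        rw [show (if (!decide (0 < esl)) = true then (1:Int) else (esl:Int) + 1) = (esl:Int) + 1
              from by by_cases h0 : 0 < esl <;> simp [h0] <;> omega,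
            show (if (!decide (0 < esl)) = true then (i:Int) else if 0 < esl then (i:Int) - (esl:Int) else -1) = (i:Int) - (esl:Int)
              from by by_cases h0 : 0 < esl <;> simp [h0] <;> omega]
        rw [if_pos htr]
      · -- no trigger: esl + 1 < size
        simp only [hc, BEq.rfl, if_true]
        have hIH := ih (i + 1) (esl + 1) (by push_cast; omega) (by omega) (by push_cast; omega)
          (by intro j hj1 hj2
              by_cases hji : j = i
              · subst hji; simpa [hc] using hget
              · exact hdots j (by omega) (by omega))
        rw [show ((i+1:Nat):Int) = (i:Int)+1 by push_cast; ring,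
            show ((esl+1:Nat):Int) = (esl:Int)+1 by push_cast; ring] at hIH
        rw [show (if (!decide (0 < esl)) = true then (1:Int) else (esl:Int) + 1) = (esl:Int) + 1
              from by by_cases h0 : 0 < esl <;> simp [h0] <;> omega,
            show (if (!decide (0 < esl)) = true then (i:Int) else if 0 < esl then (i:Int) - (esl:Int) else -1) = (i:Int) - (esl:Int)
              from by by_cases h0 : 0 < esl <;> simp [h0] <;> omega]
        rw [if_neg (by omega : ¬ size ≤ (esl:Int) + 1)]
        rw [show (i:Int) + 1 - ((esl:Int) + 1) = (i:Int) - (esl:Int) by ring] at hIH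
        simpa [show (0:Nat) < esl + 1 by omega] using hIH
    · -- non-dot at i
      rw [show (block[i] == ".") = false by simp [hc]]
      simp only [Bool.false_eq_true, if_false, if_neg (by omega : ¬ size ≤ (0:Int))]
      have hIH := ih (i + 1) 0 (by push_cast; omega) (by omega) (by omega)
        (by intro j hj1 hj2; omega)
      rw [show ((i+1:Nat):Int) = (i:Int)+1 by push_cast; ring] at hIH
      have hIH2 : pvScanA fi size m ((i:Int)+1) (-1) 0 false block
          = pvScanB fi size (fi - size + 1 - ((i:Int)+1)).toNat ((i:Int)+1) block := by
        simpa using hIH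
      rw [hIH2]
      -- skip rejected starts [i - esl, i + 1): each window contains the non-dot cell i
      refine (pvScanB_skip fi size block ((esl:Int) + 1).toNat ((i:Int) - (esl:Int)) ((i:Int) + 1)
        (by omega) (by omega) ?_).symm
      intro s hs1 hs2
      by_contra hT
      rw [Bool.not_eq_false, pvAllDots_iff] at hT
      have := hT ((i:Int) - s) (by omega) (by omega)
      rw [show s + ((i:Int) - s) = (i:Int) by ring, hget] at this
      exact hc (by injection this)

-- ===== VERDICT (by name: the statement is the Claim_ definition above) =====
theorem move_file_spec : Claim_equal_move_file := by
  intro block fi size _hdom hpre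
  unfold Spec_move_file move_file move_file_alt
  by_cases hsz : size ≤ 0
  · rw [pvScanB_nonpos fi size hsz]
    by_cases hfi0 : fi ≤ 0
    · rw [show fi.toNat = 0 by omega]
      rfl
    · have hne : block ≠ [] := by
        rcases hpre with h | ⟨_, hne⟩ | ⟨h, _⟩
        · omega
        · exact hne
        · omega
      obtain ⟨c, rest, rfl⟩ : ∃ c rest, block = c :: rest := by
        cases block with
        | nil => exact absurd rfl hne
        | cons c rest => exact ⟨c, rest, rfl⟩
      rw [show fi.toNat = (fi.toNat - 1) + 1 by omega]
      simp only [pvScanA, if_pos (by omega : (0:Int) < fi)]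
      by_cases hc : c = "." <;>
        simp [hc, pvSwapGo, PySem.List.pyRange_one_eq_nil hsz,
              show size ≤ (1:Int) by omega, hsz]
  · by_cases hfi0 : fi ≤ 0
    · rw [show fi.toNat = 0 by omega, show (fi - size + 1).toNat = 0 by omega]
      rfl
    · have hfi_len : fi ≤ (block.length : Int) := by
        rcases hpre with h | ⟨h, _⟩ | ⟨_, hlen⟩
        · omega
        · omega
        · by_cases hg : pvHasGap block fi size = true
          · rw [if_pos hg] at hlen; omega
          · rw [if_neg hg] at hlen; omega
      have hmain := pvScan_main fi size block (by omega) hfi_len fi.toNat 0 0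
        (by push_cast; omega) (by omega) (by omega)
        (by intro j hj1 hj2; omega)
      simpa using hmain
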